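-- pv_equiv track=rewrite | github.com/OnDefend/Dyna-Defcon-33 | core/production_apk_validator.py | _categorize_vulnerabilities
-- ===== SOURCE A (Python) =====
-- from typing import Dict, List, Optional, Any, Tuple, Union
--
-- def _categorize_vulnerabilities(findings: List[Dict[str, Any]]) -> Dict[str, int]:
--     """Categorize vulnerabilities by type"""
--     categories = {
--         'injection': 0,
--         'crypto': 0,
--         'auth': 0,
--         'network': 0,
--         'platform': 0,
--         'code': 0,
--         'resilience': 0,
--         'privacy': 0,
--         'other': 0
--     }
--
--     for finding in findings:
--         title = finding.get('title', '').lower()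
--         description = finding.get('description', '').lower()
--         text = f"{title} {description}"
--
--         # Simple categorization based on keywords
--         if any(keyword in text for keyword in ['injection', 'sql', 'xss', 'command']):
--             categories['injection'] += 1
--         elif any(keyword in text for keyword in ['crypto', 'encryption', 'hash', 'key']):
--             categories['crypto'] += 1
--         elif any(keyword in text for keyword in ['auth', 'login', 'password', 'session']):
--             categories['auth'] += 1
--         elif any(keyword in text for keyword in ['network', 'http', 'ssl', 'tls']):
--             categories['network'] += 1
--         elif any(keyword in text for keyword in ['platform', 'permission', 'intent']):
--             categories['platform'] += 1
--         elif any(keyword in text for keyword in ['code', 'source', 'binary']):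
--             categories['code'] += 1
--         elif any(keyword in text for keyword in ['resilience', 'tamper', 'debug']):
--             categories['resilience'] += 1
--         elif any(keyword in text for keyword in ['privacy', 'data', 'leak']):
--             categories['privacy'] += 1
--         else:
--             categories['other'] += 1
--
--     return categories
-- ===== SOURCE B (Python) =====
-- from typing import Dict, List, Any
--
-- _CATEGORIES = [
--     ('injection', ['injection', 'sql', 'xss', 'command']),
--     ('crypto', ['crypto', 'encryption', 'hash', 'key']),
--     ('auth', ['auth', 'login', 'password', 'session']),
--     ('network', ['network', 'http', 'ssl', 'tls']),
--     ('platform', ['platform', 'permission', 'intent']),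
--     ('code', ['code', 'source', 'binary']),
--     ('resilience', ['resilience', 'tamper', 'debug']),
--     ('privacy', ['privacy', 'data', 'leak']),
-- ]
--
-- def _categorize_vulnerabilities(findings: List[Dict[str, Any]]) -> Dict[str, int]:
--     """Categorize vulnerabilities by a category-major sieve: for each category in
--     priority order, count and remove the remaining texts that match it; what is
--     left at the end is 'other'."""
--     remaining = [
--         f"{f.get('title', '').lower()} {f.get('description', '').lower()}"
--         for f in findings
--     ]
--     counts = {}
--     for name, kws in _CATEGORIES:
--         matched = [t for t in remaining if any(k in t for k in kws)]
--         remaining = [t for t in remaining if not any(k in t for k in kws)]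
--         counts[name] = len(matched)
--     counts['other'] = len(remaining)
--     return counts
-- ===== Notes on version B (the rewrite author's own statement) =====
-- stated objective: alternative
-- what changed: Replaces A's finding-major elif ladder (one pass over findings, nine-way branch incrementing a dict) by a category-major sieve: one pass per category in priority order that counts and removes the matching texts from a shrinking remaining pool, the leftover pool being 'other'.
import Mathlib
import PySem

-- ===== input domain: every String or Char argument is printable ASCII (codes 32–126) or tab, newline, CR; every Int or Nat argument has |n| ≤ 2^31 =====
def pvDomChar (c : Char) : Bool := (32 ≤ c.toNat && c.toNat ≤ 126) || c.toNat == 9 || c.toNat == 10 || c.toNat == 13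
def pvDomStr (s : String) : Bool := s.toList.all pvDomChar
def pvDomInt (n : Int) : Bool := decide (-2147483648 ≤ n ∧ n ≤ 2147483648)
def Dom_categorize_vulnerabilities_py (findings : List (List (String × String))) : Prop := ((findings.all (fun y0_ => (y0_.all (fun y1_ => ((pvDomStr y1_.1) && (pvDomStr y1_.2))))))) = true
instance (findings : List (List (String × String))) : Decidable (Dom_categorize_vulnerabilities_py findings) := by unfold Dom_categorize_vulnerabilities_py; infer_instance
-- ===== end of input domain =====

-- B replaces A's per-finding elif ladder by a category-major sieve: for each
-- category in priority order it counts and removes the matching texts from the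
-- remaining pool; the leftover pool is 'other' (objective: alternative; same value).


-- ===== PORT A =====
-- text = f"{finding.get('title','').lower()} {finding.get('description','').lower()}"
def pvText (finding : List (String × String)) : String :=
  let d : PySem.Dict String String := PySem.Dict.mk finding
  PySem.Str.lower (d.getD "title" "") ++ " " ++ PySem.Str.lower (d.getD "description" "")

def categorize_vulnerabilities_py (findings : List (List (String × String))) : List (String × Int) :=
  let categories : PySem.Dict String Int := PySem.Dict.mk
    [("injection", 0), ("crypto", 0), ("auth", 0), ("network", 0), ("platform", 0),
     ("code", 0), ("resilience", 0), ("privacy", 0), ("other", 0)]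
  let final := findings.foldl (fun categories finding =>
    let text := pvText finding
    if (["injection", "sql", "xss", "command"].any (fun k => PySem.Str.isIn k text)) then
      categories.modify "injection" 0 (· + 1)
    else if (["crypto", "encryption", "hash", "key"].any (fun k => PySem.Str.isIn k text)) then
      categories.modify "crypto" 0 (· + 1)
    else if (["auth", "login", "password", "session"].any (fun k => PySem.Str.isIn k text)) then
      categories.modify "auth" 0 (· + 1)
    else if (["network", "http", "ssl", "tls"].any (fun k => PySem.Str.isIn k text)) then
      categories.modify "network" 0 (· + 1)
    else if (["platform", "permission", "intent"].any (fun k => PySem.Str.isIn k text)) then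
      categories.modify "platform" 0 (· + 1)
    else if (["code", "source", "binary"].any (fun k => PySem.Str.isIn k text)) then
      categories.modify "code" 0 (· + 1)
    else if (["resilience", "tamper", "debug"].any (fun k => PySem.Str.isIn k text)) then
      categories.modify "resilience" 0 (· + 1)
    else if (["privacy", "data", "leak"].any (fun k => PySem.Str.isIn k text)) then
      categories.modify "privacy" 0 (· + 1)
    else
      categories.modify "other" 0 (· + 1)) categories
  final.items

-- ===== PORT B =====
def pvCategories : List (String × List String) :=
  [("injection", ["injection", "sql", "xss", "command"]),
   ("crypto", ["crypto", "encryption", "hash", "key"]),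
   ("auth", ["auth", "login", "password", "session"]),
   ("network", ["network", "http", "ssl", "tls"]),
   ("platform", ["platform", "permission", "intent"]),
   ("code", ["code", "source", "binary"]),
   ("resilience", ["resilience", "tamper", "debug"]),
   ("privacy", ["privacy", "data", "leak"])]

-- any(k in t for k in kws)
def pvMatch (kws : List String) (t : String) : Bool :=
  kws.any (fun k => PySem.Str.isIn k t)

-- category-major sieve: the state is (counts so far, remaining texts)
def categorize_vulnerabilities_py_alt (findings : List (List (String × String))) : List (String × Int) :=
  let texts := findings.map pvText
  let r := pvCategories.foldl (fun (st : List (String × Int) × List String) p =>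
      let matched := st.2.filter (fun t => pvMatch p.2 t)
      let remaining := st.2.filter (fun t => !(pvMatch p.2 t))
      (st.1 ++ [(p.1, (matched.length : Int))], remaining))
    ([], texts)
  r.1 ++ [("other", (r.2.length : Int))]

-- ===== PRECONDITION & SPEC =====
def Spec_categorize_vulnerabilities_py (findings : List (List (String × String))) (out : List (String × Int)) : Prop := out = categorize_vulnerabilities_py_alt findings
instance (findings : List (List (String × String))) (out : List (String × Int)) : Decidable (Spec_categorize_vulnerabilities_py findings out) := by unfold Spec_categorize_vulnerabilities_py; infer_instance

-- ===== CLAIM (what is proved, stated in full; the proofs are below) =====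
def Claim_equal_categorize_vulnerabilities_py : Prop := ∀ (findings : List (List (String × String))), Dom_categorize_vulnerabilities_py findings → Spec_categorize_vulnerabilities_py findings (categorize_vulnerabilities_py findings)

-- ===== LEMMAS AND PROOFS =====

-- the first-match label of a text, used only by the proofs (neither port computes it)
def pvLabelT (t : String) : String :=
  ((pvCategories.find? (fun p => pvMatch p.2 t)).map (·.1)).getD "other"

def pvLabel (finding : List (String × String)) : String := pvLabelT (pvText finding)

-- the initial dict of A
def pvCats0 : PySem.Dict String Int := PySem.Dict.mk
  [("injection", 0), ("crypto", 0), ("auth", 0), ("network", 0), ("platform", 0),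
   ("code", 0), ("resilience", 0), ("privacy", 0), ("other", 0)]

-- A's elif ladder increments exactly the key the first-match label selects
set_option maxHeartbeats 2000000 in
lemma pvStep_eq (d : PySem.Dict String Int) (fd : List (String × String)) :
    (if (["injection", "sql", "xss", "command"].any (fun k => PySem.Str.isIn k (pvText fd))) then
       d.modify "injection" 0 (· + 1)
     else if (["crypto", "encryption", "hash", "key"].any (fun k => PySem.Str.isIn k (pvText fd))) then
       d.modify "crypto" 0 (· + 1)
     else if (["auth", "login", "password", "session"].any (fun k => PySem.Str.isIn k (pvText fd))) then
       d.modify "auth" 0 (· + 1)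
     else if (["network", "http", "ssl", "tls"].any (fun k => PySem.Str.isIn k (pvText fd))) then
       d.modify "network" 0 (· + 1)
     else if (["platform", "permission", "intent"].any (fun k => PySem.Str.isIn k (pvText fd))) then
       d.modify "platform" 0 (· + 1)
     else if (["code", "source", "binary"].any (fun k => PySem.Str.isIn k (pvText fd))) then
       d.modify "code" 0 (· + 1)
     else if (["resilience", "tamper", "debug"].any (fun k => PySem.Str.isIn k (pvText fd))) then
       d.modify "resilience" 0 (· + 1)
     else if (["privacy", "data", "leak"].any (fun k => PySem.Str.isIn k (pvText fd))) then
       d.modify "privacy" 0 (· + 1)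
     else
       d.modify "other" 0 (· + 1)) = d.modify (pvLabel fd) 0 (· + 1) := by
  simp only [pvLabel, pvLabelT, pvCategories, pvMatch, List.find?_cons, List.find?_nil]
  generalize (["injection", "sql", "xss", "command"].any (fun k => PySem.Str.isIn k (pvText fd))) = b1
  generalize (["crypto", "encryption", "hash", "key"].any (fun k => PySem.Str.isIn k (pvText fd))) = b2
  generalize (["auth", "login", "password", "session"].any (fun k => PySem.Str.isIn k (pvText fd))) = b3
  generalize (["network", "http", "ssl", "tls"].any (fun k => PySem.Str.isIn k (pvText fd))) = b4
  generalize (["platform", "permission", "intent"].any (fun k => PySem.Str.isIn k (pvText fd))) = b5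
  generalize (["code", "source", "binary"].any (fun k => PySem.Str.isIn k (pvText fd))) = b6
  generalize (["resilience", "tamper", "debug"].any (fun k => PySem.Str.isIn k (pvText fd))) = b7
  generalize (["privacy", "data", "leak"].any (fun k => PySem.Str.isIn k (pvText fd))) = b8
  cases b1 <;> cases b2 <;> cases b3 <;> cases b4 <;>
    cases b5 <;> cases b6 <;> cases b7 <;> cases b8 <;> rfl

-- the first-match label of any finding is one of the nine category names
lemma pv_find_mem (l : List (String × List String)) (p : String × List String → Bool) :
    (((l.find? p).map (fun x => x.1)).getD "other") ∈ l.map (fun x => x.1) ++ ["other"] := by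
  cases h : l.find? p with
  | none => simp
  | some q =>
      have hq := List.mem_of_find?_eq_some h
      simp only [Option.map_some, Option.getD_some, List.mem_append, List.mem_map]
      exact Or.inl ⟨q, hq, rfl⟩

lemma pvLabel_mem (fd : List (String × String)) :
    pvLabel fd ∈ ["injection", "crypto", "auth", "network", "platform", "code",
                  "resilience", "privacy", "other"] := by
  have := pv_find_mem pvCategories
    (fun p => pvMatch p.2 (pvText fd))
  simpa [pvLabel, pvLabelT, pvCategories] using this

-- a dict with unique keys is the list of its keys paired with their values
lemma pv_items_eq_keys_map (d : PySem.Dict String Int) (h : d.keys.Nodup) :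
    d.items = d.keys.map (fun k => (k, d.getD k 0)) := by
  simp only [PySem.Dict.keys, List.map_map]
  conv_lhs => rw [← List.map_id d.items]
  refine List.map_congr_left (fun p hp => ?_)
  obtain ⟨k, v⟩ := p
  have hg : d.get? k = some v := PySem.Dict.get?_of_mem_items d hp h
  simp [Function.comp, PySem.Dict.getD_eq_get?_getD, hg]

-- A's fold is the label-counting fold
set_option maxHeartbeats 1000000 in
lemma pvA_eq (findings : List (List (String × String))) :
    categorize_vulnerabilities_py findings =
      ((findings.map pvLabel).foldl (fun d x => d.modify x 0 (· + 1)) pvCats0).items := by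
  rw [List.foldl_map]
  suffices h : ∀ (l : List (List (String × String))) (d : PySem.Dict String Int),
      List.foldl (fun categories finding =>
        let text := pvText finding;
        if (["injection", "sql", "xss", "command"].any (fun k => PySem.Str.isIn k text)) then
          categories.modify "injection" 0 (· + 1)
        else if (["crypto", "encryption", "hash", "key"].any (fun k => PySem.Str.isIn k text)) then
          categories.modify "crypto" 0 (· + 1)
        else if (["auth", "login", "password", "session"].any (fun k => PySem.Str.isIn k text)) then
          categories.modify "auth" 0 (· + 1)
        else if (["network", "http", "ssl", "tls"].any (fun k => PySem.Str.isIn k text)) then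
          categories.modify "network" 0 (· + 1)
        else if (["platform", "permission", "intent"].any (fun k => PySem.Str.isIn k text)) then
          categories.modify "platform" 0 (· + 1)
        else if (["code", "source", "binary"].any (fun k => PySem.Str.isIn k text)) then
          categories.modify "code" 0 (· + 1)
        else if (["resilience", "tamper", "debug"].any (fun k => PySem.Str.isIn k text)) then
          categories.modify "resilience" 0 (· + 1)
        else if (["privacy", "data", "leak"].any (fun k => PySem.Str.isIn k text)) then
          categories.modify "privacy" 0 (· + 1)
        else
          categories.modify "other" 0 (· + 1)) d l =
      List.foldl (fun d x => d.modify (pvLabel x) 0 (· + 1)) d l by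
    exact congrArg PySem.Dict.items (h findings pvCats0)
  intro l
  induction l with
  | nil => intro d; rfl
  | cons fd rest ih =>
      intro d
      simp only [List.foldl_cons]
      rw [pvStep_eq]
      exact ih _

-- the label equals a given name exactly when the corresponding boolean sieve fires
set_option maxHeartbeats 2000000 in
lemma pvLabelT_eq (t : String) :
    ((pvLabelT t == "injection") = pvMatch ["injection", "sql", "xss", "command"] t) ∧
    ((pvLabelT t == "crypto") = (!pvMatch ["injection", "sql", "xss", "command"] t &&
        pvMatch ["crypto", "encryption", "hash", "key"] t)) ∧
    ((pvLabelT t == "auth") = (!pvMatch ["injection", "sql", "xss", "command"] t &&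
        !pvMatch ["crypto", "encryption", "hash", "key"] t &&
        pvMatch ["auth", "login", "password", "session"] t)) ∧
    ((pvLabelT t == "network") = (!pvMatch ["injection", "sql", "xss", "command"] t &&
        !pvMatch ["crypto", "encryption", "hash", "key"] t &&
        !pvMatch ["auth", "login", "password", "session"] t &&
        pvMatch ["network", "http", "ssl", "tls"] t)) ∧
    ((pvLabelT t == "platform") = (!pvMatch ["injection", "sql", "xss", "command"] t &&
        !pvMatch ["crypto", "encryption", "hash", "key"] t &&
        !pvMatch ["auth", "login", "password", "session"] t &&
        !pvMatch ["network", "http", "ssl", "tls"] t &&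
        pvMatch ["platform", "permission", "intent"] t)) ∧
    ((pvLabelT t == "code") = (!pvMatch ["injection", "sql", "xss", "command"] t &&
        !pvMatch ["crypto", "encryption", "hash", "key"] t &&
        !pvMatch ["auth", "login", "password", "session"] t &&
        !pvMatch ["network", "http", "ssl", "tls"] t &&
        !pvMatch ["platform", "permission", "intent"] t &&
        pvMatch ["code", "source", "binary"] t)) ∧
    ((pvLabelT t == "resilience") = (!pvMatch ["injection", "sql", "xss", "command"] t &&
        !pvMatch ["crypto", "encryption", "hash", "key"] t &&
        !pvMatch ["auth", "login", "password", "session"] t &&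
        !pvMatch ["network", "http", "ssl", "tls"] t &&
        !pvMatch ["platform", "permission", "intent"] t &&
        !pvMatch ["code", "source", "binary"] t &&
        pvMatch ["resilience", "tamper", "debug"] t)) ∧
    ((pvLabelT t == "privacy") = (!pvMatch ["injection", "sql", "xss", "command"] t &&
        !pvMatch ["crypto", "encryption", "hash", "key"] t &&
        !pvMatch ["auth", "login", "password", "session"] t &&
        !pvMatch ["network", "http", "ssl", "tls"] t &&
        !pvMatch ["platform", "permission", "intent"] t &&
        !pvMatch ["code", "source", "binary"] t &&
        !pvMatch ["resilience", "tamper", "debug"] t &&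
        pvMatch ["privacy", "data", "leak"] t)) ∧
    ((pvLabelT t == "other") = (!pvMatch ["injection", "sql", "xss", "command"] t &&
        !pvMatch ["crypto", "encryption", "hash", "key"] t &&
        !pvMatch ["auth", "login", "password", "session"] t &&
        !pvMatch ["network", "http", "ssl", "tls"] t &&
        !pvMatch ["platform", "permission", "intent"] t &&
        !pvMatch ["code", "source", "binary"] t &&
        !pvMatch ["resilience", "tamper", "debug"] t &&
        !pvMatch ["privacy", "data", "leak"] t)) := by
  simp only [pvLabelT, pvCategories, List.find?_cons, List.find?_nil]
  generalize (pvMatch ["injection", "sql", "xss", "command"] t) = b1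
  generalize (pvMatch ["crypto", "encryption", "hash", "key"] t) = b2
  generalize (pvMatch ["auth", "login", "password", "session"] t) = b3
  generalize (pvMatch ["network", "http", "ssl", "tls"] t) = b4
  generalize (pvMatch ["platform", "permission", "intent"] t) = b5
  generalize (pvMatch ["code", "source", "binary"] t) = b6
  generalize (pvMatch ["resilience", "tamper", "debug"] t) = b7
  generalize (pvMatch ["privacy", "data", "leak"] t) = b8
  cases b1 <;> cases b2 <;> cases b3 <;> cases b4 <;>
    cases b5 <;> cases b6 <;> cases b7 <;> cases b8 <;> exact ⟨rfl, rfl, rfl, rfl, rfl, rfl, rfl, rfl, rfl⟩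

-- counting a label over findings = counting the matching sieve predicate over the texts
lemma pv_count_label (findings : List (List (String × String))) (n : String) (q : String → Bool)
    (h : ∀ t, (pvLabelT t == n) = q t) :
    (findings.map pvLabel).count n = ((findings.map pvText).filter q).length := by
  rw [← List.countP_eq_length_filter, List.count_eq_countP, List.countP_map, List.countP_map]
  refine List.countP_congr (fun fd _ => ?_)
  simp only [Function.comp, pvLabel]
  rw [h (pvText fd)]

-- ===== VERDICT (by name: the statement is the Claim_ definition above) =====
set_option maxHeartbeats 2000000 in
theorem categorize_vulnerabilities_py_spec : Claim_equal_categorize_vulnerabilities_py := by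
  intro findings _
  show categorize_vulnerabilities_py findings = categorize_vulnerabilities_py_alt findings
  rw [pvA_eq]
  set labels := findings.map pvLabel with hlab
  set final := labels.foldl (fun d x => d.modify x 0 (· + 1)) pvCats0 with hfin
  have hk0 : pvCats0.keys = ["injection", "crypto", "auth", "network", "platform",
      "code", "resilience", "privacy", "other"] := rfl
  have hkeys : final.keys = pvCats0.keys := by
    rw [hfin, PySem.Dict.keys_foldl_modify, PySem.Set.update_eq_append_filter]
    have hnil : (PySem.Set.ofList labels).filter
        (fun y => !(PySem.Set.contains pvCats0.keys y)) = [] := by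
      refine List.filter_eq_nil_iff.mpr (fun y hy => ?_)
      have hm : y ∈ labels := (PySem.Set.mem_ofList _ _).mp hy
      obtain ⟨fd, _, rfl⟩ := List.mem_map.mp (hlab ▸ hm)
      simp
      exact hk0 ▸ pvLabel_mem fd
    rw [hnil, List.append_nil]
  have hnodup : final.keys.Nodup := by rw [hkeys, hk0]; decide
  have hgetD : ∀ k, final.getD k 0 = pvCats0.getD k 0 + labels.count k := fun k => by
    rw [hfin]; exact PySem.Dict.getD_foldl_modify_add_one ..
  rw [pv_items_eq_keys_map final hnodup, hkeys, hk0]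
  -- unfold B's sieve over the concrete eight-entry table
  show _ = categorize_vulnerabilities_py_alt findings
  simp only [categorize_vulnerabilities_py_alt, pvCategories, List.foldl_cons, List.foldl_nil,
             List.filter_filter, List.nil_append, List.cons_append, List.map_cons, List.map_nil, hgetD]
  norm_num [pvCats0, PySem.Dict.getD, PySem.Dict.get?]
  refine ⟨?_, ?_, ?_, ?_, ?_, ?_, ?_, ?_, ?_⟩ <;>
    · rw [pv_count_label findings _ _ (fun t => by
        have := pvLabelT_eq t
        first
          | exact this.1
          | exact this.2.1
          | exact this.2.2.1
          | exact this.2.2.2.1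
          | exact this.2.2.2.2.1
          | exact this.2.2.2.2.2.1
          | exact this.2.2.2.2.2.2.1
          | exact this.2.2.2.2.2.2.2.1
          | exact this.2.2.2.2.2.2.2.2)]
      try simp [Bool.and_comm, Bool.and_left_comm]
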